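-- pv_equiv track=rewrite | github.com/MADiazV1/algo_rem_mem_2025_parcial_3 | sim_algo_reem_mem.py | procesar
-- ===== SOURCE A (Python) =====
-- def procesar(segmentos, reqs, marcos_libres):
--     tabla_paginas = {}
--     marcos_ocupados = []
--     resultado = []
--     max_direccion = 0x1FF
--
--     # Helper para verificar si una dirección pertenece a un segmento válido
--     def direccion_valida(direccion):
--         for nombre, base, limite in segmentos:
--             if base <= direccion < base + limite:
--                 return True
--         return False
--
--     # Algoritmo FIFO: elimina el más antiguo
--     def reemplazar_marco():
--         marco_viejo = marcos_ocupados.pop(0)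
--         # Eliminar de la tabla de páginas
--         for pagina in list(tabla_paginas):
--             if tabla_paginas[pagina] == marco_viejo:
--                 del tabla_paginas[pagina]
--                 break
--         return marco_viejo
--
--     for req in reqs:
--         if not direccion_valida(req):
--             resultado.append((req, max_direccion, "Segmentation Fault")) # Direccion invalida
--             continue
--
--         pagina = req >> 4  # Tamaño de página de 16 bytes
--         offset = req & 0xF # Posicion exacta dentro de una pagina donde se encuentra la direccion logica
--
--         if pagina in tabla_paginas:
--             marco = tabla_paginas[pagina]
--             direccion_fisica = (marco << 4) | offset
--             resultado.append((req, direccion_fisica, "Marco ya estaba asignado"))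
--         else:
--             if marcos_libres:
--                 marco = marcos_libres.pop(0)
--                 tabla_paginas[pagina] = marco
--                 marcos_ocupados.append(marco)
--                 direccion_fisica = (marco << 4) | offset
--                 resultado.append((req, direccion_fisica, "Marco libre asignado"))
--             else:
--                 marco = reemplazar_marco()
--                 tabla_paginas[pagina] = marco
--                 marcos_ocupados.append(marco)
--                 direccion_fisica = (marco << 4) | offset
--                 resultado.append((req, direccion_fisica, "Marco asignado"))
--
--     return resultado
-- ===== SOURCE B (Python) =====
-- def procesar(segmentos, reqs, marcos_libres):
--     MAX_DIR = 0x1FF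
--
--     # Preprocess segments once: sorted, merged, disjoint intervals; membership by binary search.
--     ivs = sorted(((base, base + limite) for _, base, limite in segmentos if limite > 0),
--                  key=lambda iv: iv[0])
--     merged = []
--     for s, e in ivs:
--         if merged and s <= merged[-1][1]:
--             if e > merged[-1][1]:
--                 merged[-1] = (merged[-1][0], e)
--         else:
--             merged.append((s, e))
--     starts = [s for s, _ in merged]
--
--     def valida(d):
--         lo, hi = 0, len(starts)
--         while lo < hi:
--             mid = (lo + hi) // 2
--             if starts[mid] <= d:
--                 lo = mid + 1
--             else:
--                 hi = mid
--         return lo > 0 and d < merged[lo - 1][1]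
--
--     tabla = {}   # page -> frame
--     fifo = []    # (frame, page) pairs, oldest first: O(1) eviction, no table scan
--     idx = 0      # frames consumed from marcos_libres
--     out = []
--     for req in reqs:
--         if not valida(req):
--             out.append((req, MAX_DIR, "Segmentation Fault"))
--             continue
--         page, off = req >> 4, req & 0xF
--         if page in tabla:
--             out.append((req, (tabla[page] << 4) | off, "Marco ya estaba asignado"))
--             continue
--         if idx < len(marcos_libres):
--             frame, msg = marcos_libres[idx], "Marco libre asignado"
--             idx += 1
--         else:
--             frame, old_page = fifo.pop(0)
--             del tabla[old_page]
--             msg = "Marco asignado"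
--         tabla[page] = frame
--         fifo.append((frame, page))
--         out.append((req, (frame << 4) | off, msg))
--     del marcos_libres[:idx]   # mirror A's consumption of the free-frame list
--     return out
-- ===== Notes on version B (the rewrite author's own statement) =====
-- stated objective: faster
-- what changed: B precomputes the segments once into sorted merged disjoint intervals and answers each validity query by hand-written binary search, and replaces A's eviction-time scan over the page table (list(tabla_paginas) copy + linear search) with a FIFO of (frame, page) pairs giving O(1) eviction; free frames are taken by index instead of pop(0).
-- outside the precondition, e.g. on procesar([('a', 0, 16)], [3], []): A raises IndexError, B raises IndexError
import Mathlib
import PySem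

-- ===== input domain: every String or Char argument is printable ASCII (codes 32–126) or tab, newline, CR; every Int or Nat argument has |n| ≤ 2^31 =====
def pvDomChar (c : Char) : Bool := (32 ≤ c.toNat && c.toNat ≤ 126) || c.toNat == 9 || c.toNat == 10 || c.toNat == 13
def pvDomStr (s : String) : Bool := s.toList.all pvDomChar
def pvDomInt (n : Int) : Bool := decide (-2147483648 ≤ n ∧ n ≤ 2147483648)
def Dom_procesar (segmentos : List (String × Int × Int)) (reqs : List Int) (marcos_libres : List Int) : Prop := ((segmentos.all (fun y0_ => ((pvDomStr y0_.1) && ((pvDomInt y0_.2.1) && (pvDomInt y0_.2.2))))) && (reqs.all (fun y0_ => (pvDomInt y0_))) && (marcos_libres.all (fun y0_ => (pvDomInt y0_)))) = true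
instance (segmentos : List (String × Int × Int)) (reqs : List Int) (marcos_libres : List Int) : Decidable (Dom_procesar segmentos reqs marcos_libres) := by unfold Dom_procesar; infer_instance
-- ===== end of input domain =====

-- B replaces A's per-request linear segment scan by sorted/merged intervals with binary search, and
-- A's eviction-time scan over the page table by a FIFO of (frame, page) pairs.  Both A and B consume
-- the free frames from the front of `marcos_libres` in place; the equivalence proved here is about
-- the RETURN value (the mutation is identical in the two Pythons).

-- ===== PORT A =====

-- 'direccion_valida': linear scan with early return
def pvValidA (segmentos : List (String × Int × Int)) (d : Int) : Bool :=
  match segmentos with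
  | [] => false
  | s :: rest => if s.2.1 ≤ d ∧ d < s.2.1 + s.2.2 then true else pvValidA rest d

-- inner loop of 'reemplazar_marco': delete the first page mapped to marco (break after the first hit)
def pvBorrarPagina (tabla : PySem.Dict Int Int) (marco : Int) : PySem.Dict Int Int :=
  match tabla.keys.find? (fun p => tabla.get? p == some marco) with
  | some p => tabla.erase p
  | none => tabla

-- one iteration of A's main loop; state = (tabla_paginas, marcos_ocupados, marcos_libres, resultado)
def pvStepA (segmentos : List (String × Int × Int))
    (st : PySem.Dict Int Int × List Int × List Int × List (Int × Int × String)) (req : Int) :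
    PySem.Dict Int Int × List Int × List Int × List (Int × Int × String) :=
  let (tabla, ocupados, libres, res) := st
  if !(pvValidA segmentos req) then
    (tabla, ocupados, libres, res ++ [(req, 511, "Segmentation Fault")])
  else
    let pagina := req >>> (4 : Nat)
    let offset := PySem.Int.band req 15
    match tabla.get? pagina with
    | some marco =>
        (tabla, ocupados, libres, res ++ [(req, PySem.Int.bor (marco <<< (4 : Nat)) offset, "Marco ya estaba asignado")])
    | none =>
      match libres with
      | marco :: restLibres =>
          (tabla.insert pagina marco, ocupados ++ [marco], restLibres,
           res ++ [(req, PySem.Int.bor (marco <<< (4 : Nat)) offset, "Marco libre asignado")])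
      | [] =>
        match ocupados with
        | marco :: restOcupados =>   -- marcos_ocupados.pop(0)
            ((pvBorrarPagina tabla marco).insert pagina marco, restOcupados ++ [marco], [],
             res ++ [(req, PySem.Int.bor (marco <<< (4 : Nat)) offset, "Marco asignado")])
        | [] => (tabla, ocupados, libres, res)   -- Python raises IndexError here; excluded by Pre_

def procesar (segmentos : List (String × Int × Int)) (reqs : List Int) (marcos_libres : List Int) : List (Int × Int × String) :=
  (reqs.foldl (pvStepA segmentos) (PySem.Dict.empty, [], marcos_libres, [])).2.2.2

-- ===== PORT B =====

-- one step of B's interval-merge loop over the sorted intervals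
def pvMergeStep (acc : List (Int × Int)) (iv : Int × Int) : List (Int × Int) :=
  match acc.getLast? with
  | some last =>
      if iv.1 ≤ last.2 then
        (if last.2 < iv.2 then acc.dropLast ++ [(last.1, iv.2)] else acc)
      else acc ++ [iv]
  | none => [iv]

-- 'merged': the sorted positive-length intervals, merged into disjoint ones
def pvMerged (segmentos : List (String × Int × Int)) : List (Int × Int) :=
  (PySem.List.sorted
      (segmentos.filterMap (fun s => if s.2.2 > 0 then some (s.2.1, s.2.1 + s.2.2) else none))
      (fun iv => iv.1) false).foldl pvMergeStep []

-- the hand-written bisect-right while-loop of 'valida' (indices in range whenever hi ≤ starts.length,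
-- which B's call guarantees; getD 0 is exact there)
def pvBis (starts : List Int) (d : Int) (lo hi : Nat) : Nat :=
  if lo < hi then
    let mid := (lo + hi) / 2
    if starts.getD mid 0 ≤ d then pvBis starts d (mid + 1) hi else pvBis starts d lo mid
  else lo
termination_by hi - lo
decreasing_by all_goals omega

-- 'valida': binary search for the last merged interval starting at or before d
def pvValidB (merged : List (Int × Int)) (starts : List Int) (d : Int) : Bool :=
  let lo := pvBis starts d 0 starts.length
  decide (0 < lo) && decide (d < (merged.getD (lo - 1) (0, 0)).2)

-- one iteration of B's main loop; state = (tabla, fifo, idx, out)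
def pvStepB (merged : List (Int × Int)) (starts : List Int) (marcos_libres : List Int)
    (st : PySem.Dict Int Int × List (Int × Int) × Nat × List (Int × Int × String)) (req : Int) :
    PySem.Dict Int Int × List (Int × Int) × Nat × List (Int × Int × String) :=
  let (tabla, fifo, idx, out) := st
  if !(pvValidB merged starts req) then
    (tabla, fifo, idx, out ++ [(req, 511, "Segmentation Fault")])
  else
    let page := req >>> (4 : Nat)
    let off := PySem.Int.band req 15
    match tabla.get? page with
    | some f =>
        (tabla, fifo, idx, out ++ [(req, PySem.Int.bor (f <<< (4 : Nat)) off, "Marco ya estaba asignado")])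
    | none =>
      if idx < marcos_libres.length then
        let frame := marcos_libres.getD idx 0   -- in range: idx < length
        (tabla.insert page frame, fifo ++ [(frame, page)], idx + 1,
         out ++ [(req, PySem.Int.bor (frame <<< (4 : Nat)) off, "Marco libre asignado")])
      else
        match fifo with
        | (frame, old) :: rest =>   -- fifo.pop(0); del tabla[old]
            ((tabla.erase old).insert page frame, rest ++ [(frame, page)], idx,
             out ++ [(req, PySem.Int.bor (frame <<< (4 : Nat)) off, "Marco asignado")])
        | [] => (tabla, fifo, idx, out)   -- Python raises IndexError here; excluded by Pre_

def procesar_alt (segmentos : List (String × Int × Int)) (reqs : List Int) (marcos_libres : List Int) : List (Int × Int × String) :=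
  let merged := pvMerged segmentos
  let starts := merged.map (fun iv => iv.1)
  (reqs.foldl (pvStepB merged starts marcos_libres) (PySem.Dict.empty, [], 0, [])).2.2.2

-- ===== PRECONDITION & SPEC =====
-- Pre_ excludes exactly the inputs where A raises IndexError: no free frame was ever provided yet a
-- request hits a valid segment address (the FIFO pop on the empty frame list fails; B raises there too).
def Pre_procesar (segmentos : List (String × Int × Int)) (reqs : List Int) (marcos_libres : List Int) : Prop :=
  marcos_libres ≠ [] ∨ ∀ r ∈ reqs, ∀ s ∈ segmentos, ¬ (s.2.1 ≤ r ∧ r < s.2.1 + s.2.2)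
instance (segmentos : List (String × Int × Int)) (reqs : List Int) (marcos_libres : List Int) : Decidable (Pre_procesar segmentos reqs marcos_libres) := by unfold Pre_procesar; infer_instance

def pvWitness_procesar : (List (String × Int × Int)) × List Int × List Int :=
  ([("code", 0, 32)], [3, 19, 3, 100], [5, 7])

def Spec_procesar (segmentos : List (String × Int × Int)) (reqs : List Int) (marcos_libres : List Int) (out : List (Int × Int × String)) : Prop := out = procesar_alt segmentos reqs marcos_libres
instance (segmentos : List (String × Int × Int)) (reqs : List Int) (marcos_libres : List Int) (out : List (Int × Int × String)) : Decidable (Spec_procesar segmentos reqs marcos_libres out) := by unfold Spec_procesar; infer_instance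

-- ===== CLAIM (what is proved, stated in full; the proofs are below) =====
def Claim_equal_procesar : Prop := ∀ (segmentos : List (String × Int × Int)) (reqs : List Int) (marcos_libres : List Int), Dom_procesar segmentos reqs marcos_libres → Pre_procesar segmentos reqs marcos_libres → Spec_procesar segmentos reqs marcos_libres (procesar segmentos reqs marcos_libres)

-- ===== LEMMAS AND PROOFS =====

-- d lies in one of the intervals
def pvInIvs (ivs : List (Int × Int)) (d : Int) : Prop := ∃ iv ∈ ivs, iv.1 ≤ d ∧ d < iv.2

-- merged lists are strict: each interval nonempty, pairwise in order with gaps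
def pvBounds (l : List (Int × Int)) : Prop :=
  (∀ iv ∈ l, iv.1 < iv.2) ∧ l.Pairwise (fun a b => a.2 < b.1)

theorem pvValidA_iff (segmentos : List (String × Int × Int)) (d : Int) :
    pvValidA segmentos d = true ↔ ∃ s ∈ segmentos, s.2.1 ≤ d ∧ d < s.2.1 + s.2.2 := by
  induction segmentos with
  | nil => simp [pvValidA]
  | cons s rest ih =>
    rw [pvValidA]
    split_ifs with h
    · simp [h]
    · simp [ih, h]

theorem pvMerge_go (ivs : List (Int × Int)) : ∀ (acc : List (Int × Int)),
    ivs.Pairwise (fun a b => a.1 ≤ b.1) →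
    (∀ iv ∈ ivs, iv.1 < iv.2) →
    pvBounds acc →
    (∀ l ∈ acc.getLast?, ∀ iv ∈ ivs, l.1 ≤ iv.1) →
    pvBounds (ivs.foldl pvMergeStep acc) ∧
    ∀ d, (pvInIvs (ivs.foldl pvMergeStep acc) d ↔ pvInIvs acc d ∨ pvInIvs ivs d) := by
  induction ivs with
  | nil => intro acc _ _ hacc _; simpa [pvInIvs] using hacc
  | cons iv rest ih =>
    intro acc hs hpos hacc hlast
    obtain ⟨hs_head, hs_rest⟩ := List.pairwise_cons.mp hs
    have hpos_iv : iv.1 < iv.2 := hpos iv (by simp)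
    have hpos_rest : ∀ x ∈ rest, x.1 < x.2 := fun x hx => hpos x (by simp [hx])
    simp only [List.foldl_cons]
    -- analyse one merge step
    rcases List.eq_nil_or_concat acc with hnil | ⟨init, last, hconcat⟩
    · -- acc = []
      subst hnil
      have hstep : pvMergeStep [] iv = [iv] := by simp [pvMergeStep]
      rw [hstep]
      have h := ih [iv] hs_rest hpos_rest
        ⟨by simpa using hpos_iv, by simp⟩
        (by simpa using hs_head)
      refine ⟨h.1, fun d => ?_⟩
      rw [h.2 d]
      simp [pvInIvs]
    · rw [List.concat_eq_append] at hconcat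
      subst hconcat
      have hgl : (init ++ [last]).getLast? = some last := by
        simp
      obtain ⟨hacc_pos, hacc_pw⟩ := hacc
      have hinit_lt : ∀ a ∈ init, a.2 < last.1 := by
        intro a ha
        have := (List.pairwise_append.mp hacc_pw).2.2
        simpa using this a ha
      have hlast_pos : last.1 < last.2 := hacc_pos last (by simp)
      have hlast_le_iv : last.1 ≤ iv.1 := hlast last (by simp [hgl]) iv (by simp)
      by_cases hm : iv.1 ≤ last.2
      · by_cases hext : last.2 < iv.2
        · -- extend last interval
          have hstep : pvMergeStep (init ++ [last]) iv = init ++ [(last.1, iv.2)] := by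
            simp [pvMergeStep, hgl, hm, hext]
          rw [hstep]
          have hacc' : pvBounds (init ++ [(last.1, iv.2)]) := by
            constructor
            · intro x hx
              rcases List.mem_append.mp hx with h1 | h1
              · exact hacc_pos x (by simp [h1])
              · simp at h1; subst h1; exact lt_trans hlast_pos hext
            · rw [List.pairwise_append]
              refine ⟨(List.pairwise_append.mp hacc_pw).1, by simp, ?_⟩
              intro a ha b hb
              simp at hb; subst hb
              exact hinit_lt a ha
          have hlast' : ∀ l ∈ (init ++ [(last.1, iv.2)]).getLast?, ∀ x ∈ rest, l.1 ≤ x.1 := by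
            intro l hl x hx
            simp at hl
            subst hl
            exact le_trans hlast_le_iv (hs_head x hx)
          have h := ih _ hs_rest hpos_rest hacc' hlast'
          refine ⟨h.1, fun d => ?_⟩
          rw [h.2 d]
          constructor
          · rintro (h1 | h1)
            · rcases h1 with ⟨x, hx, hx1, hx2⟩
              rcases List.mem_append.mp hx with h2 | h2
              · exact Or.inl ⟨x, by simp [h2], hx1, hx2⟩
              · simp at h2; subst h2
                by_cases hd : d < last.2
                · exact Or.inl ⟨last, by simp, hx1, hd⟩
                · exact Or.inr ⟨iv, by simp, by omega, hx2⟩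
            · rcases h1 with ⟨x, hx, hx1, hx2⟩
              exact Or.inr ⟨x, by simp [hx], hx1, hx2⟩
          · rintro (h1 | h1)
            · rcases h1 with ⟨x, hx, hx1, hx2⟩
              rcases List.mem_append.mp hx with h2 | h2
              · exact Or.inl ⟨x, by simp [h2], hx1, hx2⟩
              · simp at h2
                rw [h2] at hx1 hx2
                exact Or.inl ⟨(last.1, iv.2), by simp, hx1, by omega⟩
            · rcases h1 with ⟨x, hx, hx1, hx2⟩
              rcases List.mem_cons.mp hx with h2 | h2
              · rw [h2] at hx1 hx2
                exact Or.inl ⟨(last.1, iv.2), by simp, by omega, by omega⟩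
              · exact Or.inr ⟨x, h2, hx1, hx2⟩
        · -- iv absorbed
          have hstep : pvMergeStep (init ++ [last]) iv = init ++ [last] := by
            simp [pvMergeStep, hgl, hm, hext]
          rw [hstep]
          have hlast' : ∀ l ∈ (init ++ [last]).getLast?, ∀ x ∈ rest, l.1 ≤ x.1 := by
            intro l hl x hx
            rw [hgl] at hl; simp at hl; subst hl
            exact le_trans hlast_le_iv (hs_head x hx)
          have h := ih _ hs_rest hpos_rest ⟨hacc_pos, hacc_pw⟩ hlast'
          refine ⟨h.1, fun d => ?_⟩
          rw [h.2 d]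
          constructor
          · rintro (h1 | h1)
            · exact Or.inl h1
            · exact Or.inr (h1.imp fun x hx => ⟨by simp [hx.1], hx.2⟩)
          · rintro (h1 | h1)
            · exact Or.inl h1
            · rcases h1 with ⟨x, hx, hx1, hx2⟩
              rcases List.mem_cons.mp hx with h2 | h2
              · subst h2
                exact Or.inl ⟨last, by simp, by omega, by omega⟩
              · exact Or.inr ⟨x, h2, hx1, hx2⟩
      · -- new interval appended
        have hstep : pvMergeStep (init ++ [last]) iv = (init ++ [last]) ++ [iv] := by
          simp [pvMergeStep, hgl, hm]
        rw [hstep]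
        have hacc' : pvBounds ((init ++ [last]) ++ [iv]) := by
          constructor
          · intro x hx
            rcases List.mem_append.mp hx with h1 | h1
            · exact hacc_pos x h1
            · simp at h1; subst h1; exact hpos_iv
          · rw [List.pairwise_append]
            refine ⟨hacc_pw, by simp, ?_⟩
            intro a ha b hb
            simp at hb; subst hb
            rcases List.mem_append.mp ha with h1 | h1
            · have := hinit_lt a h1; omega
            · simp at h1; subst h1; omega
        have hlast' : ∀ l ∈ ((init ++ [last]) ++ [iv]).getLast?, ∀ x ∈ rest, l.1 ≤ x.1 := by
          intro l hl x hx
          simp at hl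
          subst hl
          exact hs_head x hx
        have h := ih _ hs_rest hpos_rest hacc' hlast'
        refine ⟨h.1, fun d => ?_⟩
        rw [h.2 d]
        constructor
        · rintro (h1 | h1)
          · rcases h1 with ⟨x, hx, hx1, hx2⟩
            rcases List.mem_append.mp hx with h2 | h2
            · exact Or.inl ⟨x, h2, hx1, hx2⟩
            · simp at h2
              rw [h2] at hx1 hx2
              exact Or.inr ⟨iv, by simp, hx1, hx2⟩
          · rcases h1 with ⟨x, hx, hx1, hx2⟩
            exact Or.inr ⟨x, by simp [hx], hx1, hx2⟩
        · rintro (h1 | h1)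
          · rcases h1 with ⟨x, hx, hx1, hx2⟩
            exact Or.inl ⟨x, List.mem_append.mpr (Or.inl hx), hx1, hx2⟩
          · rcases h1 with ⟨x, hx, hx1, hx2⟩
            rcases List.mem_cons.mp hx with h2 | h2
            · rw [h2] at hx1 hx2
              exact Or.inl ⟨iv, by simp, hx1, hx2⟩
            · exact Or.inr ⟨x, h2, hx1, hx2⟩

theorem pvBis_spec (xs : List Int) (d : Int) :
    ∀ n lo hi, hi - lo ≤ n → lo ≤ hi → hi ≤ xs.length →
    (∀ i < lo, xs.getD i 0 ≤ d) →
    (∀ i, hi ≤ i → i < xs.length → d < xs.getD i 0) →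
    (∀ i j, i ≤ j → j < xs.length → xs.getD i 0 ≤ xs.getD j 0) →
    lo ≤ pvBis xs d lo hi ∧ pvBis xs d lo hi ≤ hi ∧
    (∀ i < pvBis xs d lo hi, xs.getD i 0 ≤ d) ∧
    (∀ i, pvBis xs d lo hi ≤ i → i < xs.length → d < xs.getD i 0) := by
  intro n
  induction n with
  | zero =>
    intro lo hi hfuel hle hlen hlo hhi _
    have : lo = hi := by omega
    subst this
    rw [pvBis]
    simp only [lt_irrefl, if_false]
    exact ⟨le_refl _, le_refl _, hlo, hhi⟩
  | succ n ih =>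
    intro lo hi hfuel hle hlen hlo hhi hmono
    rw [pvBis]
    by_cases h : lo < hi
    · simp only [h, if_true]
      split_ifs with hm
      · -- xs[mid] ≤ d, recurse right
        have := ih (((lo+hi)/2)+1) hi (by omega) (by omega) hlen
          (by intro i hi'
              by_cases hc : i < lo
              · exact hlo i hc
              · exact le_trans (hmono i ((lo+hi)/2) (by omega) (by omega)) hm)
          hhi hmono
        exact ⟨by omega, this.2.1, this.2.2.1, this.2.2.2⟩
      · simp only [not_le] at hm
        have := ih lo ((lo+hi)/2) (by omega) (by omega) (by omega) hlo
          (by intro i hi1 hi2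
              exact lt_of_lt_of_le hm (hmono ((lo+hi)/2) i hi1 hi2))
          hmono
        exact ⟨this.1, by omega, this.2.2.1, this.2.2.2⟩
    · simp only [h, if_false]
      have : lo = hi := by omega
      subst this
      exact ⟨le_refl _, le_refl _, hlo, hhi⟩

-- B's 'valida' decides membership in the merged intervals
theorem pvValidB_iff (merged : List (Int × Int)) (d : Int) (hb : pvBounds merged) :
    pvValidB merged (merged.map (fun iv => iv.1)) d = true ↔ pvInIvs merged d := by
  obtain ⟨hpos, hpw⟩ := hb
  set starts := merged.map (fun iv => iv.1) with hst
  have hlen : starts.length = merged.length := by simp [hst]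
  have hidx : ∀ i, i < merged.length → starts.getD i 0 = (merged.getD i (0, 0)).1 := by
    intro i h
    rw [List.getD_eq_getElem _ _ (by simpa [hst] using h), List.getD_eq_getElem _ _ h]
    simp [hst]
  have hpwE : ∀ i j, i < j → j < merged.length →
      (merged.getD i (0, 0)).2 < (merged.getD j (0, 0)).1 := by
    intro i j hij hj
    rw [List.getD_eq_getElem _ _ (by omega), List.getD_eq_getElem _ _ hj]
    exact List.pairwise_iff_getElem.mp hpw i j (by omega) hj hij
  have hposE : ∀ i, i < merged.length →
      (merged.getD i (0, 0)).1 < (merged.getD i (0, 0)).2 := by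
    intro i h
    rw [List.getD_eq_getElem _ _ h]
    exact hpos _ (List.getElem_mem h)
  have hmemE : ∀ i, i < merged.length → merged.getD i (0, 0) ∈ merged := by
    intro i h
    rw [List.getD_eq_getElem _ _ h]
    exact List.getElem_mem h
  have hmono : ∀ i j, i ≤ j → j < starts.length → starts.getD i 0 ≤ starts.getD j 0 := by
    intro i j hij hj
    rw [hlen] at hj
    rw [hidx i (by omega), hidx j hj]
    rcases Nat.eq_or_lt_of_le hij with h | h
    · subst h; exact le_refl _
    · have h1 := hpwE i j h hj
      have h2 := hposE i (by omega)
      omega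
  obtain ⟨-, hr2, hr3, hr4⟩ := pvBis_spec starts d starts.length 0 starts.length (by omega)
    (by omega) (le_refl _) (by omega) (by intro i h1 h2; omega) hmono
  simp only [pvValidB, Bool.and_eq_true, decide_eq_true_eq]
  constructor
  · rintro ⟨h0, hlt⟩
    set r := pvBis starts d 0 starts.length with hr
    have hrlen : r - 1 < merged.length := by omega
    have h1 : (merged.getD (r-1) (0, 0)).1 ≤ d := by
      rw [← hidx (r-1) hrlen]; exact hr3 (r-1) (by omega)
    exact ⟨merged.getD (r-1) (0, 0), hmemE (r-1) hrlen, h1, hlt⟩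
  · rintro ⟨iv, hmem, h1, h2⟩
    obtain ⟨k, hk, hkeq⟩ := List.getElem_of_mem hmem
    have hkD : merged.getD k (0, 0) = iv := by rw [List.getD_eq_getElem _ _ hk, hkeq]
    set r := pvBis starts d 0 starts.length with hr
    have hkr : k < r := by
      by_contra hc
      have := hr4 k (by omega) (by omega)
      rw [hidx k hk, hkD] at this
      omega
    have hkeqr : k = r - 1 := by
      by_contra hc
      have hrlen : r - 1 < merged.length := by omega
      have hlt := hpwE k (r-1) (by omega) hrlen
      have hle := hr3 (r-1) (by omega)
      rw [hidx (r-1) hrlen] at hle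
      rw [hkD] at hlt
      omega
    refine ⟨by omega, ?_⟩
    rw [← hkeqr, hkD]
    exact h2

-- the two validity tests agree
theorem pvValid_eq (segmentos : List (String × Int × Int)) (d : Int) :
    pvValidB (pvMerged segmentos) ((pvMerged segmentos).map (fun iv => iv.1)) d
      = pvValidA segmentos d := by
  set L := segmentos.filterMap (fun s => if s.2.2 > 0 then some (s.2.1, s.2.1 + s.2.2) else none) with hL
  set SL := PySem.List.sorted L (fun iv => iv.1) false with hSL
  have hs : SL.Pairwise (fun a b => a.1 ≤ b.1) := by
    simpa [hSL] using PySem.List.sorted_pairwise L (fun iv => iv.1)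
  have hpos : ∀ iv ∈ SL, iv.1 < iv.2 := by
    intro iv hiv
    rw [hSL, PySem.List.mem_sorted, hL, List.mem_filterMap] at hiv
    obtain ⟨s, _, hfs⟩ := hiv
    split_ifs at hfs with hgt
    cases hfs; simpa using hgt
  have hmg := pvMerge_go SL [] hs hpos ⟨by simp, by simp⟩ (by simp)
  have hmerged : pvMerged segmentos = SL.foldl pvMergeStep [] := by rw [pvMerged]
  rw [Bool.eq_iff_iff, hmerged, pvValidB_iff _ _ hmg.1, pvValidA_iff, hmg.2 d]
  have hnil : ¬ pvInIvs [] d := by simp [pvInIvs]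
  constructor
  · rintro (h | ⟨iv, hiv, h1, h2⟩)
    · exact absurd h hnil
    · rw [hSL, PySem.List.mem_sorted, hL, List.mem_filterMap] at hiv
      obtain ⟨s, hsin, hfs⟩ := hiv
      split_ifs at hfs with hgt
      cases hfs; exact ⟨s, hsin, h1, h2⟩
  · rintro ⟨s, hsin, h1, h2⟩
    refine Or.inr ⟨(s.2.1, s.2.1 + s.2.2), ?_, h1, h2⟩
    rw [hSL, PySem.List.mem_sorted, hL, List.mem_filterMap]
    exact ⟨s, hsin, by rw [if_pos (by omega)]⟩

-- the simulation invariant between A's state and B's state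
def pvRel (ml : List Int)
    (a : PySem.Dict Int Int × List Int × List Int × List (Int × Int × String))
    (b : PySem.Dict Int Int × List (Int × Int) × Nat × List (Int × Int × String)) : Prop :=
  a.1 = b.1 ∧
  b.1 = PySem.Dict.mk (b.2.1.map (fun q => (q.2, q.1))) ∧
  (b.2.1.map (fun q => q.2)).Nodup ∧
  a.2.1 = b.2.1.map (fun q => q.1) ∧
  a.2.2.1 = ml.drop b.2.2.1 ∧
  a.2.2.2 = b.2.2.2 ∧
  b.2.1.length = b.2.2.1 ∧ b.2.2.1 ≤ ml.length

theorem pvInsert_items_of_get?_none (d : PySem.Dict Int Int) (k v : Int) (h : d.get? k = none) :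
    (d.insert k v).items = d.items ++ [(k, v)] :=
  PySem.Dict.items_insert_of_not_contains d v
    (by rw [PySem.Dict.contains_eq_isSome_get?, h]; rfl)

-- appending one fresh element keeps a list duplicate-free
theorem pvNodup_snoc {α : Type} (xs : List α) (x : α) (h1 : xs.Nodup) (h2 : x ∉ xs) :
    (xs ++ [x]).Nodup := by
  rw [List.nodup_append]
  exact ⟨h1, List.nodup_singleton _, by
    intro a ha b hb
    rw [List.mem_singleton] at hb
    subst hb
    exact fun he => h2 (he ▸ ha)⟩

-- erasing the front key of a dict whose remaining keys differ from it
theorem pvErase_cons (p m : Int) (T : List (Int × Int)) (hnp : p ∉ T.map Prod.fst) :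
    (PySem.Dict.mk ((p, m) :: T)).erase p = PySem.Dict.mk T := by
  simp only [PySem.Dict.erase, List.filter, BEq.rfl, Bool.not_true]
  congr 1
  apply List.filter_eq_self.mpr
  intro q hq
  rw [Bool.not_eq_eq_eq_not, Bool.not_true, beq_eq_false_iff_ne]
  intro hqp
  exact hnp (hqp ▸ List.mem_map_of_mem hq)

-- A's page-table scan deletes exactly the front page of the FIFO
theorem pvBorrar_eq (p m : Int) (T : List (Int × Int)) (hnp : p ∉ T.map Prod.fst) :
    pvBorrarPagina (PySem.Dict.mk ((p, m) :: T)) m = PySem.Dict.mk T := by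
  unfold pvBorrarPagina
  have hget : (PySem.Dict.mk ((p, m) :: T)).get? p = some m := by
    simp [PySem.Dict.get?]
  have hkeys : (PySem.Dict.mk ((p, m) :: T)).keys = p :: T.map Prod.fst := by
    simp [PySem.Dict.keys]
  rw [hkeys, List.find?_cons, hget]
  simp only [BEq.rfl]
  exact pvErase_cons p m T hnp

-- a lookup missing in a cons dict is missing in its tail
theorem pvGet?_tail_none (p m k : Int) (T : List (Int × Int))
    (h : (PySem.Dict.mk ((p, m) :: T)).get? k = none) : (PySem.Dict.mk T).get? k = none := by
  rw [PySem.Dict.get?_mk_cons] at h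
  split_ifs at h
  exact h

theorem pvStep_sim (segmentos : List (String × Int × Int)) (ml : List Int) (req : Int)
    (a : PySem.Dict Int Int × List Int × List Int × List (Int × Int × String))
    (b : PySem.Dict Int Int × List (Int × Int) × Nat × List (Int × Int × String))
    (hrel : pvRel ml a b)
    (hok : pvValidA segmentos req = true → ml ≠ []) :
    pvRel ml (pvStepA segmentos a req)
      (pvStepB (pvMerged segmentos) ((pvMerged segmentos).map (fun iv => iv.1)) ml b req) := by
  obtain ⟨tA, oc, lib, res⟩ := a
  obtain ⟨tB, fifo, idx, out⟩ := b
  simp only [pvRel] at hrel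
  obtain ⟨hT, htab, hnod, hoc, hlib, hres, hlen, hle⟩ := hrel
  subst hT htab hoc hlib hres hlen
  rw [pvStepA, pvStepB, pvValid_eq]
  cases hv : pvValidA segmentos req with
  | false =>
    simp only [Bool.not_false, if_true]
    exact ⟨rfl, rfl, hnod, rfl, rfl, rfl, rfl, hle⟩
  | true =>
    simp only [Bool.not_true, Bool.false_eq_true, if_false]
    cases hget : (PySem.Dict.mk (fifo.map (fun q => (q.2, q.1)))).get? (req >>> (4 : Nat)) with
    | some marco =>
      exact ⟨rfl, rfl, hnod, rfl, rfl, rfl, rfl, hle⟩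
    | none =>
      have hfresh : req >>> (4 : Nat) ∉ fifo.map (fun q => q.2) := by
        have h1 := (PySem.Dict.get?_eq_none_iff_not_mem_keys _ _).mp hget
        simp only [PySem.Dict.keys, List.map_map] at h1
        simpa [Function.comp] using h1
      by_cases hfree : fifo.length < ml.length
      · -- a free frame remains
        have hdrop : ml.drop fifo.length = ml[fifo.length] :: ml.drop (fifo.length + 1) :=
          List.drop_eq_getElem_cons hfree
        rw [hdrop]
        simp only [hfree, if_true]
        have hgd : ml.getD fifo.length 0 = ml[fifo.length] := List.getD_eq_getElem _ _ hfree
        rw [hgd]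
        refine ⟨rfl, ?_, ?_, by simp, by simp, rfl, by simp, by show fifo.length + 1 ≤ ml.length; omega⟩
        · apply PySem.Dict.ext
          rw [pvInsert_items_of_get?_none _ _ _ hget]
          simp
        · show ((fifo ++ [(ml[fifo.length], req >>> (4 : Nat))]).map (fun q => q.2)).Nodup
          rw [List.map_append]
          exact pvNodup_snoc _ _ hnod (by simpa using hfresh)
      · -- eviction
        have hdropnil : ml.drop fifo.length = [] := List.drop_eq_nil_of_le (by omega)
        rw [hdropnil]
        have hml : ml ≠ [] := hok hv
        have hfifo : fifo ≠ [] := by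
          intro hcon
          rw [hcon] at hle hfree
          exact hml (List.eq_nil_of_length_eq_zero (by simp at hfree ⊢; omega))
        obtain ⟨⟨m, p⟩, rest, hfe⟩ := List.exists_cons_of_ne_nil hfifo
        subst hfe
        simp only [hfree, if_false, List.map_cons]
        have hpnotin : p ∉ (rest.map (fun q => (q.2, q.1))).map Prod.fst := by
          have := hnod
          simp only [List.map_cons, List.nodup_cons] at this
          simpa [List.map_map, Function.comp] using this.1
        have hget' : (PySem.Dict.mk (rest.map (fun q => (q.2, q.1)))).get? (req >>> (4 : Nat)) = none :=
          pvGet?_tail_none p m _ _ hget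
        rw [pvBorrar_eq p m _ hpnotin, pvErase_cons p m _ hpnotin]
        refine ⟨rfl, ?_, ?_, by simp, ?_, rfl, by simp, hle⟩
        · apply PySem.Dict.ext
          rw [pvInsert_items_of_get?_none _ _ _ hget']
          simp
        · have hnod' : (rest.map (fun q => q.2)).Nodup := by
            have := hnod
            simp only [List.map_cons, List.nodup_cons] at this
            exact this.2
          have hfresh' : req >>> (4 : Nat) ∉ rest.map (fun q => q.2) := by
            intro hc
            exact hfresh (by simp [hc])
          show ((rest ++ [(m, req >>> (4 : Nat))]).map (fun q => q.2)).Nodup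
          rw [List.map_append]
          exact pvNodup_snoc _ _ hnod' (by simpa using hfresh')
        · simpa using hdropnil

-- ===== VERDICT (by name: the statement is the Claim_ definition above) =====
theorem procesar_spec : Claim_equal_procesar := by
  unfold Claim_equal_procesar
  intro segmentos reqs ml _ hpre
  unfold Spec_procesar
  have hok : ∀ r ∈ reqs, pvValidA segmentos r = true → ml ≠ [] := by
    rcases hpre with h | h
    · intro r _ _; exact h
    · intro r hr hv
      exfalso
      obtain ⟨s, hs, h1⟩ := (pvValidA_iff segmentos r).mp hv
      exact h r hr s hs h1
  have H : ∀ (rs : List Int) a b, (∀ r ∈ rs, pvValidA segmentos r = true → ml ≠ []) →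
      pvRel ml a b →
      pvRel ml (rs.foldl (pvStepA segmentos) a)
        (rs.foldl (pvStepB (pvMerged segmentos) ((pvMerged segmentos).map (fun iv => iv.1)) ml) b) := by
    intro rs
    induction rs with
    | nil => intro a b _ hrel; exact hrel
    | cons r rs ih =>
      intro a b hok' hrel
      simp only [List.foldl_cons]
      exact ih _ _ (fun x hx => hok' x (by simp [hx]))
        (pvStep_sim segmentos ml r a b hrel (hok' r (by simp)))
  have h0 : pvRel ml (PySem.Dict.empty, [], ml, []) (PySem.Dict.empty, [], 0, []) := by
    exact ⟨rfl, rfl, List.nodup_nil, rfl, rfl, rfl, rfl, by show 0 ≤ ml.length; omega⟩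
  have hfin := H reqs _ _ hok h0
  show (reqs.foldl (pvStepA segmentos) (PySem.Dict.empty, [], ml, [])).2.2.2
      = (reqs.foldl (pvStepB (pvMerged segmentos) ((pvMerged segmentos).map (fun iv => iv.1)) ml)
          (PySem.Dict.empty, [], 0, [])).2.2.2
  exact hfin.2.2.2.2.2.1
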